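-- pv_equiv track=rewrite | github.com/GT-SALT/collective_attention | scripts/data_processing/tag_NE_FB_data.py | mark_NE_in_status
-- ===== SOURCE A (Python) =====
-- def mark_NE_in_status(tags, keep_tag_type=False):
--     """
--     Add NE tag to the end of all
--     NEs in status and join into
--     combined string.
--     """
--     status_list = []
--     curr_tag = ''
--     curr_ne = []
--     for word, tag in tags:
--         if(tag != 'O'):
--             if(curr_tag != '' and tag != curr_tag and len(curr_ne) > 0):
--                 curr_ne = ('_'.join([x for x,y in curr_ne]), curr_ne[0][1]) # save (word,tag)
--                 status_list.append(curr_ne)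
--                 curr_ne = []
--             curr_ne.append((word, tag))
--         elif(tag != curr_tag and curr_tag != ''):
--             curr_ne = ('_'.join([x for x,y in curr_ne]), curr_ne[0][1]) # save (word,tag)
--             status_list.append(curr_ne)
--             curr_ne = []
--         if(tag == 'O'):
--             status_list.append((word, tag))
--         curr_tag = tag
--     # catch any straggler NEs
--     if(len(curr_ne) > 0):
--         curr_ne = ('_'.join([x for x,y in curr_ne]), curr_ne[0][1]) # save (word,tag)
--         status_list.append(curr_ne)
--     if(keep_tag_type):
--         status_word_list = ['%s.<NE.%s>'%(word, tag) if tag != 'O' else word for word, tag in status_list]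
--     else:
--         status_word_list = ['%s.<NE>'%(word) if tag != 'O' else word for word, tag in status_list]
--     status_str = ' '.join(status_word_list)
--     return status_str
-- ===== SOURCE B (Python) =====
-- def mark_NE_in_status(tags, keep_tag_type=False):
--     """
--     Add NE tag to the end of all
--     NEs in status and join into
--     combined string.
--     """
--     # Phase 1: group maximal runs of equal non-'O' tags; each 'O' word stays
--     # its own entry.
--     status_list = []
--     n = len(tags)
--     i = 0
--     while i < n:
--         word, tag = tags[i]
--         if tag == 'O':
--             status_list.append((word, tag))
--             i += 1
--         else:
--             j = i + 1
--             while j < n and tags[j][1] == tag: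
--                 j += 1
--             status_list.append(('_'.join(w for w, _ in tags[i:j]), tag))
--             i = j
--     # Phase 2: format.
--     if keep_tag_type:
--         out = ['%s.<NE.%s>' % (w, t) if t != 'O' else w for w, t in status_list]
--     else:
--         out = ['%s.<NE>' % w if t != 'O' else w for w, t in status_list]
--     return ' '.join(out)
-- ===== Notes on version B (the rewrite author's own statement) =====
-- stated objective: alternative
-- what changed: Replaces A's carried flush state machine (curr_tag/curr_ne with three flush sites inside one for-loop) by a two-phase scan: group each maximal run of equal non-'O' tags in one inner sweep and underscore-join its words, then a separate formatting pass; Pre_ excludes inputs where an empty-string tag is immediately followed by a different tag, because the '' tag collides with A's no-previous-tag sentinel and the grouping A returns there is an accident of that encoding.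
-- outside the precondition, e.g. on mark_NE_in_status([('a', ''), ('b', 'B')], False): A returns 'a_b.<NE>', B returns 'a.<NE> b.<NE>'; on mark_NE_in_status([('a', ''), ('b', 'O')], False): A returns 'b a.<NE>', B returns 'a.<NE> b'
import Mathlib
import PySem

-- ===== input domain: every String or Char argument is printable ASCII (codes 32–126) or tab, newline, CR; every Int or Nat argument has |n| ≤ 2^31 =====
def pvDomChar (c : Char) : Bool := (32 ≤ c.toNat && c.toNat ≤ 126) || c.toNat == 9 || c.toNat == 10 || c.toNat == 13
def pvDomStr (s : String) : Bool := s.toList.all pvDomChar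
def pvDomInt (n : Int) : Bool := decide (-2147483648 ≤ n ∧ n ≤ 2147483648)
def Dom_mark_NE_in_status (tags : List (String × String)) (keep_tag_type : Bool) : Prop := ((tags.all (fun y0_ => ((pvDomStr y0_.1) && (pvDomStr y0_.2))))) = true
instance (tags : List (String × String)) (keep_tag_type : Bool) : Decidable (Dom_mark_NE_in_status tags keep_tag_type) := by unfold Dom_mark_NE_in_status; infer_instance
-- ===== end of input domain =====

-- B replaces A's carried flush state machine (curr_tag/curr_ne, three flush sites) by a two-phase
-- scan: group each maximal run of equal non-'O' tags, then format; Pre_ below excludes the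
-- empty-string-tag corner where A's sentinel encoding makes the grouping accidental.

-- ===== PORT A =====
-- curr_ne = ('_'.join([x for x,y in curr_ne]), curr_ne[0][1]); Python would raise IndexError on
-- curr_ne = [] here, but every flush site either guards len(curr_ne) > 0 or is reachable only
-- with a non-empty curr_ne, so the headD default is never used.
def pvFlushA (cn : List (String × String)) : String × String :=
  (PySem.Str.join "_" (cn.map Prod.fst), (cn.headD ("", "")).2)

-- one iteration of A's for-loop over state (status_list, curr_tag, curr_ne)
def pvStepA (st : List (String × String) × String × List (String × String)) (p : String × String) :
    List (String × String) × String × List (String × String) :=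
  let (sl, ct, cn) := st
  let (word, tag) := p
  if tag ≠ "O" then
    let (sl, cn) := if ct ≠ "" ∧ tag ≠ ct ∧ cn.length > 0 then (sl ++ [pvFlushA cn], ([] : List (String × String))) else (sl, cn)
    (sl, tag, cn ++ [(word, tag)])
  else
    let (sl, cn) := if tag ≠ ct ∧ ct ≠ "" then (sl ++ [pvFlushA cn], ([] : List (String × String))) else (sl, cn)
    (sl ++ [(word, tag)], tag, cn)

def mark_NE_in_status (tags : List (String × String)) (keep_tag_type : Bool) : String :=
  let st := tags.foldl pvStepA ([], "", [])
  let sl := if st.2.2.length > 0 then st.1 ++ [pvFlushA st.2.2] else st.1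
  if keep_tag_type then
    PySem.Str.join " " (sl.map (fun p => if p.2 ≠ "O" then p.1 ++ ".<NE." ++ p.2 ++ ">" else p.1))
  else
    PySem.Str.join " " (sl.map (fun p => if p.2 ≠ "O" then p.1 ++ ".<NE>" else p.1))

-- ===== PORT B =====
-- inner while loop of Source B: take words while the tag equals t; returns (words, remainder)
def pvRunB (t : String) : List (String × String) → List String × List (String × String)
  | [] => ([], [])
  | (w, tg) :: rest =>
      if tg = t then
        let r := pvRunB t rest
        (w :: r.1, r.2)
      else ([], (w, tg) :: rest)

theorem pvRunB_len : ∀ (l : List (String × String)) (t : String), (pvRunB t l).2.length ≤ l.length := by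
  intro l
  induction l with
  | nil => intro t; simp [pvRunB]
  | cons p rest ih =>
      intro t
      obtain ⟨w, tg⟩ := p
      by_cases h : tg = t
      · simp only [pvRunB, if_pos h]
        exact le_trans (ih t) (by simp)
      · simp only [pvRunB, if_neg h]
        simp

-- outer while loop of Source B building status_list
def pvBuildB : List (String × String) → List (String × String)
  | [] => []
  | (w, tg) :: rest =>
      if tg = "O" then (w, tg) :: pvBuildB rest
      else (PySem.Str.join "_" (w :: (pvRunB tg rest).1), tg) :: pvBuildB (pvRunB tg rest).2
termination_by l => l.length
decreasing_by
  · simp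
  · exact Nat.lt_succ_of_le (pvRunB_len rest tg)

def mark_NE_in_status_alt (tags : List (String × String)) (keep_tag_type : Bool) : String :=
  let sl := pvBuildB tags
  if keep_tag_type then
    PySem.Str.join " " (sl.map (fun p => if p.2 ≠ "O" then p.1 ++ ".<NE." ++ p.2 ++ ">" else p.1))
  else
    PySem.Str.join " " (sl.map (fun p => if p.2 ≠ "O" then p.1 ++ ".<NE>" else p.1))

-- ===== PRECONDITION & SPEC =====
-- Pre_ excludes inputs where an entry whose tag is the empty string is immediately followed by an
-- entry with a different tag: the "" tag collides with A's no-previous-tag sentinel curr_tag = '',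
-- so the grouping A returns there (gluing across the tag change, or emitting the entity after the
-- following 'O' words) is an accident of the sentinel encoding and no grouping is specified for it.
def Pre_mark_NE_in_status (tags : List (String × String)) (keep_tag_type : Bool) : Prop :=
  ∀ q ∈ tags.zip tags.tail, ¬ (q.1.2 = "" ∧ q.2.2 ≠ "")
instance (tags : List (String × String)) (keep_tag_type : Bool) : Decidable (Pre_mark_NE_in_status tags keep_tag_type) := by unfold Pre_mark_NE_in_status; infer_instance

def pvWitness_mark_NE_in_status : (List (String × String)) × Bool :=
  ([("Obama", "PER"), ("visited", "O"), ("New", "LOC"), ("York", "LOC")], true)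

def Spec_mark_NE_in_status (tags : List (String × String)) (keep_tag_type : Bool) (out : String) : Prop := out = mark_NE_in_status_alt tags keep_tag_type
instance (tags : List (String × String)) (keep_tag_type : Bool) (out : String) : Decidable (Spec_mark_NE_in_status tags keep_tag_type out) := by unfold Spec_mark_NE_in_status; infer_instance

-- ===== CLAIM (what is proved, stated in full; the proofs are below) =====
def Claim_equal_mark_NE_in_status : Prop := ∀ (tags : List (String × String)) (keep_tag_type : Bool), Dom_mark_NE_in_status tags keep_tag_type → Pre_mark_NE_in_status tags keep_tag_type → Spec_mark_NE_in_status tags keep_tag_type (mark_NE_in_status tags keep_tag_type)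

-- ===== LEMMAS AND PROOFS =====

-- A's tail computation from an arbitrary loop state, including the straggler flush
def pvRunA (st : List (String × String) × String × List (String × String)) (tags : List (String × String)) : List (String × String) :=
  let st' := tags.foldl pvStepA st
  if st'.2.2.length > 0 then st'.1 ++ [pvFlushA st'.2.2] else st'.1

theorem pvRunA_cons (st : List (String × String) × String × List (String × String))
    (p : String × String) (tags : List (String × String)) :
    pvRunA st (p :: tags) = pvRunA (pvStepA st p) tags := rfl

-- absence of D_, phrased as the suffix-hereditary adjacency condition the induction carries
def pvNoGlue : List (String × String) → Prop
  | [] => True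
  | [_] => True
  | p :: q :: rest => (p.2 = "" → q.2 = "") ∧ pvNoGlue (q :: rest)

theorem pvNoGlue_tail {p : String × String} {rest : List (String × String)}
    (h : pvNoGlue (p :: rest)) : pvNoGlue rest := by
  cases rest with
  | nil => trivial
  | cons q l => exact h.2

theorem pvNoGlue_all_empty : ∀ (rest : List (String × String)) (w : String),
    pvNoGlue ((w, "") :: rest) → ∀ p ∈ rest, p.2 = "" := by
  intro rest
  induction rest with
  | nil => intro w _ p hp; cases hp
  | cons q l ih =>
      intro w h p hp
      have h1 : q.2 = "" := h.1 rfl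
      cases hp with
      | head => exact h1
      | tail _ hp' =>
          exact ih q.1 (by rw [show q = (q.1, "") from Prod.ext rfl h1] at h; exact h.2) p hp' 

-- what B appends for a pending run of words ws with tag t
def pvContB (sl : List (String × String)) (ws : List String) (t : String)
    (tags : List (String × String)) : List (String × String) :=
  sl ++ (PySem.Str.join "_" (ws ++ (pvRunB t tags).1), t) :: pvBuildB (pvRunB t tags).2

theorem pvBuild_cons_ne (sl : List (String × String)) (w tg : String)
    (rest : List (String × String)) (hO : tg ≠ "O") :
    sl ++ pvBuildB ((w, tg) :: rest) = pvContB sl [w] tg rest := by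
  simp [pvBuildB, pvContB, if_neg hO]

-- joint loop invariant over A's reachable states: neutral (no pending run, curr_tag '' or 'O'),
-- and a pending run of uniform tag ct (with, if ct = '', all remaining tags also '')
theorem pvMain : ∀ n (tags : List (String × String)), tags.length ≤ n → pvNoGlue tags →
    (∀ sl ct, (ct = "" ∨ ct = "O") →
      pvRunA (sl, ct, []) tags = sl ++ pvBuildB tags) ∧
    (∀ sl ct cn, cn ≠ [] → ct ≠ "O" → (∀ p ∈ cn, p.2 = ct) →
      (ct = "" → ∀ p ∈ tags, p.2 = "") →
      pvRunA (sl, ct, cn) tags = pvContB sl (cn.map Prod.fst) ct tags) := by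
  intro n
  induction n with
  | zero =>
      intro tags hlen _
      have htags : tags = [] := List.length_eq_zero_iff.mp (Nat.le_zero.mp hlen)
      subst htags
      refine ⟨fun sl ct _ => by simp [pvRunA, pvBuildB], fun sl ct cn hcn _ hu _ => ?_⟩
      have hflush : pvFlushA cn = (PySem.Str.join "_" (cn.map Prod.fst), ct) := by
        cases cn with
        | nil => exact absurd rfl hcn
        | cons q l => simp [pvFlushA, hu q (by simp)]
      simp [pvRunA, pvContB, pvRunB, pvBuildB, List.length_pos_iff.mpr hcn, hflush]
  | succ n ih =>
      intro tags hlen hg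
      cases tags with
      | nil =>
          refine ⟨fun sl ct _ => by simp [pvRunA, pvBuildB], fun sl ct cn hcn _ hu _ => ?_⟩
          have hflush : pvFlushA cn = (PySem.Str.join "_" (cn.map Prod.fst), ct) := by
            cases cn with
            | nil => exact absurd rfl hcn
            | cons q l => simp [pvFlushA, hu q (by simp)]
          simp [pvRunA, pvContB, pvRunB, pvBuildB, List.length_pos_iff.mpr hcn, hflush]
      | cons p rest =>
          obtain ⟨w, tg⟩ := p
          have hr : rest.length ≤ n := by simpa using hlen
          have hgr : pvNoGlue rest := pvNoGlue_tail hg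
          refine ⟨?_, ?_⟩
          · -- neutral state
            intro sl ct hct
            rw [pvRunA_cons]
            by_cases hO : tg = "O"
            · subst hO
              have hct' : ¬ (("O" : String) ≠ ct ∧ ct ≠ "") := by
                rcases hct with h | h <;> subst h <;> simp
              rw [show pvStepA (sl, ct, []) (w, "O") = (sl ++ [(w, "O")], "O", []) by
                    simp [pvStepA, hct']]
              rw [(ih rest hr hgr).1 (sl ++ [(w, "O")]) "O" (Or.inr rfl)]
              simp [pvBuildB]
            · rw [show pvStepA (sl, ct, []) (w, tg) = (sl, tg, [(w, tg)]) by
                    simp [pvStepA, hO]]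
              rw [(ih rest hr hgr).2 sl tg [(w, tg)] (by simp) hO (by simp)
                    (fun he => by
                      subst he
                      exact pvNoGlue_all_empty rest w hg)]
              rw [pvBuild_cons_ne sl w tg rest hO]
              simp
          · -- pending run of uniform tag ct
            intro sl ct cn hcn hctO hu hemp
            have hflush : pvFlushA cn = (PySem.Str.join "_" (cn.map Prod.fst), ct) := by
              cases cn with
              | nil => exact absurd rfl hcn
              | cons q l => simp [pvFlushA, hu q (by simp)]
            rw [pvRunA_cons]
            by_cases hO : tg = "O"
            · subst hO
              have hct0 : ct ≠ "" := by
                intro h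
                have := hemp h (w, "O") (by simp)
                simp at this
              have hOct : ("O" : String) ≠ ct := fun h => hctO h.symm
              rw [show pvStepA (sl, ct, cn) (w, "O") = (sl ++ [pvFlushA cn] ++ [(w, "O")], "O", []) by
                    simp [pvStepA, hOct, hct0]]
              rw [(ih rest hr hgr).1 (sl ++ [pvFlushA cn] ++ [(w, "O")]) "O" (Or.inr rfl)]
              simp [pvContB, pvRunB, hOct, pvBuildB, hflush]
            · by_cases hct : tg = ct
              · subst hct
                rw [show pvStepA (sl, tg, cn) (w, tg) = (sl, tg, cn ++ [(w, tg)]) by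
                      simp [pvStepA, hO]]
                rw [(ih rest hr hgr).2 sl tg (cn ++ [(w, tg)]) (by simp) hO
                      (by intro p hp
                          rcases List.mem_append.mp hp with h | h
                          · exact hu p h
                          · simp at h; simp [h])
                      (fun he => fun p hp => hemp he p (by simp [hp]))]
                simp only [pvContB, pvRunB]
                simp
              · have hct0 : ct ≠ "" := by
                  intro h
                  have := hemp h (w, tg) (by simp)
                  simp at this
                  exact hct (this.trans h.symm)
                rw [show pvStepA (sl, ct, cn) (w, tg) = (sl ++ [pvFlushA cn], tg, [(w, tg)]) by
                      simp [pvStepA, hO, hct, hct0, List.length_pos_iff.mpr hcn]]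
                rw [(ih rest hr hgr).2 (sl ++ [pvFlushA cn]) tg [(w, tg)] (by simp) hO (by simp)
                      (fun he => by
                        subst he
                        exact pvNoGlue_all_empty rest w hg)]
                simp only [List.map_cons, List.map_nil]
                rw [← pvBuild_cons_ne (sl ++ [pvFlushA cn]) w tg rest hO]
                simp [pvContB, pvRunB, hct, pvBuildB, hO, hflush]

theorem pvNoGlue_of_pre : ∀ tags : List (String × String),
    (∀ q ∈ tags.zip tags.tail, ¬ (q.1.2 = "" ∧ q.2.2 ≠ "")) → pvNoGlue tags := by
  intro tags
  induction tags with
  | nil => intro _; trivial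
  | cons p rest ih =>
      intro h
      cases rest with
      | nil => trivial
      | cons q l =>
          refine ⟨?_, ?_⟩
          · intro hp
            by_contra hq
            exact h (p, q) (by simp) ⟨hp, hq⟩
          · refine ih (fun r hr hbad => h r ?_ hbad)
            simp only [List.zip, List.tail] at hr ⊢
            exact List.mem_cons_of_mem _ hr

-- ===== VERDICT (by name: the statement is the Claim_ definition above) =====
theorem mark_NE_in_status_spec : Claim_equal_mark_NE_in_status := by
  intro tags keep _ hpre
  have e := (pvMain tags.length tags le_rfl (pvNoGlue_of_pre tags hpre)).1 [] "" (Or.inl rfl)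
  simp only [pvRunA, List.nil_append] at e
  show mark_NE_in_status tags keep = mark_NE_in_status_alt tags keep
  simp only [mark_NE_in_status, mark_NE_in_status_alt]
  rw [e]
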